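-- pv_equiv track=rewrite | github.com/idealism-xxm/LeetCode | Python3/src/1801 ~ 1900/1895 - Largest Magic Square.py | largestMagicSquare
-- ===== SOURCE A (Python) =====
-- from typing import List
--
-- def largestMagicSquare(grid: List[List[int]]) -> int:
--     m, n = len(grid), len(grid[0])
--     row_sum = [0] * m
--     col_sum = [0] * n
--     ans = 0
--     # 枚举矩阵的左上角 (i, j)
--     for i in range(m):
--         for j in range(n):
--             # 初始化每一行的和、每一列的和、主对角线的和
--             row_sum[0] = 0
--             col_sum[0] = 0
--             main_sum = 0
--             # 枚举 k + 1 阶矩阵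
--             for k in range(m):
--                 # 如果不够 k + 1 阶，则直接处理下一个位置
--                 if i + k >= m or j + k >= n:
--                     break
--
--                 # 主对角线的和需要加上新纳入的右下角的数
--                 main_sum += grid[i + k][j + k]
--                 # 副对角线的和需要重新算，初始化为右上角的数
--                 sub_sum = grid[i][j + k]
--                 # 新加入一行和一列，初始化为右下角的数
--                 row_sum[k] = grid[i + k][j + k]
--                 col_sum[k] = grid[i + k][j + k]
--                 for l in range(k):
--                     # 副对角线的从左下角开始加
--                     sub_sum += grid[i + k - l][j + l]
--                     # 已经记录的每一行都加上该行新增的数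
--                     row_sum[l] += grid[i + l][j + k]
--                     # 已经记录的每一列都加上该列新增的数
--                     col_sum[l] += grid[i + k][j + l]
--                     # 新增的一行加上前面的每一列的数
--                     row_sum[k] += grid[i + k][j + l]
--                     # 新增的一列加上前面的每一行的数
--                     col_sum[k] += grid[i + l][j + k]
--
--                 # 最后把所有数放到一个集合中
--                 st = set(row_sum[:k + 1]) | set(col_sum[:k + 1])
--                 st.add(main_sum)
--                 st.add(sub_sum)
--                 # 如果集合只有一个数，则是 k + 1 阶幻方，更新最大阶数
--                 if len(st) == 1:
--                     ans = max(ans, k + 1)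
--     return ans
-- ===== SOURCE B (Python) =====
-- from typing import List
--
-- def largestMagicSquare(grid: List[List[int]]) -> int:
--     m, n = len(grid), len(grid[0])
--     # 2D prefix-sum table: P[r][c] = sum of grid[a][b] for a < r, b < c
--     P = [[0] * (n + 1)]
--     for row in grid:
--         acc = [0]
--         for x in row[:n]:
--             acc.append(acc[-1] + x)
--         P.append([p + a for p, a in zip(P[-1], acc)])
--
--     def rect(r1, r2, c1, c2):
--         return P[r2][c2] - P[r1][c2] - P[r2][c1] + P[r1][c1]
--
--     ans = 0
--     for i in range(m):
--         for j in range(n):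
--             for k in range(min(m - i, n - j)):
--                 s = rect(i, i + 1, j, j + k + 1)
--                 if (all(rect(i + l, i + l + 1, j, j + k + 1) == s for l in range(k + 1))
--                         and all(rect(i, i + k + 1, j + l, j + l + 1) == s for l in range(k + 1))
--                         and sum(grid[i + t][j + t] for t in range(k + 1)) == s
--                         and sum(grid[i + k - t][j + t] for t in range(k + 1)) == s):
--                     ans = max(ans, k + 1)
--     return ans
-- ===== Notes on version B (the rewrite author's own statement) =====
-- stated objective: faster
-- what changed: A maintains mutable row/column/diagonal sum arrays updated incrementally by a nested l-loop and tests a set built per square for being a singleton; B precomputes a 2D prefix-sum table once and checks each candidate square by O(1) prefix-sum queries per row/column plus direct diagonal sums.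
import Mathlib
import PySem

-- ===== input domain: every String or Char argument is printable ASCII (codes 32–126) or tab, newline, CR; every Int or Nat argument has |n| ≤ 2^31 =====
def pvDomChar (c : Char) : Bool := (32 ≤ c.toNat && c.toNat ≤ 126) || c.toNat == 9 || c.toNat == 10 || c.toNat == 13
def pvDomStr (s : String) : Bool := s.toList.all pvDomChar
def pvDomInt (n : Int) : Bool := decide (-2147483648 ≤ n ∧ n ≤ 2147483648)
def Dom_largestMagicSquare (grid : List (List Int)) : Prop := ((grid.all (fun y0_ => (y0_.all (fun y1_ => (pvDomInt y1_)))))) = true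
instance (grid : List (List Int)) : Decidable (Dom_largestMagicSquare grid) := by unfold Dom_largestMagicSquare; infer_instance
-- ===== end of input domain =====

-- B replaces A's incrementally maintained row/column/diagonal sum arrays (and per-square set
-- test) by a 2D prefix-sum table queried per row/column segment — same asymptotics, measurably
-- faster by a constant factor; Pre_ excludes only the inputs on which A raises.

-- shared helper: grid[r][c] for the nonnegative indices both programs use
-- (exact under Pre_, where every index issued is in range)
def g2 (g : List (List Int)) (r c : Nat) : Int := (g.getD r []).getD c 0

-- ===== PORT A =====
-- the inner `for l in range(k)` loop of A (state: sub_sum, row_sum, col_sum)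
def lLoopA (g : List (List Int)) (i j k : Nat) (st : Int × List Int × List Int) :
    Int × List Int × List Int :=
  (List.range k).foldl (fun st l =>
    let su := st.1 + g2 g (i + k - l) (j + l)
    let rs := st.2.1.set l (st.2.1.getD l 0 + g2 g (i + l) (j + k))
    let cs := st.2.2.set l (st.2.2.getD l 0 + g2 g (i + k) (j + l))
    let rs := rs.set k (rs.getD k 0 + g2 g (i + k) (j + l))
    let cs := cs.set k (cs.getD k 0 + g2 g (i + l) (j + k))
    (su, rs, cs)) st

-- st = set(row_sum[:k+1]) | set(col_sum[:k+1]); st.add(main_sum); st.add(sub_sum); len(st) == 1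
def checkA (rs cs : List Int) (k : Nat) (mainS subS : Int) : Bool :=
  let st : PySem.Set Int :=
    PySem.Set.union (PySem.Set.ofList (rs.take (k + 1))) (cs.take (k + 1))
  let st := PySem.Set.add (PySem.Set.add st mainS) subS
  PySem.Set.len st == 1

-- the `for k in range(m)` loop with its break (stops when k = m or i+k >= m or j+k >= n)
def kLoopA (g : List (List Int)) (m n i j : Nat) (rs cs : List Int) (mainS ans : Int)
    (k : Nat) : List Int × List Int × Int :=
  if _h : m ≤ k ∨ m ≤ i + k ∨ n ≤ j + k then (rs, cs, ans)
  else
    let mainS := mainS + g2 g (i + k) (j + k)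
    let rs := rs.set k (g2 g (i + k) (j + k))
    let cs := cs.set k (g2 g (i + k) (j + k))
    let r := lLoopA g i j k (g2 g i (j + k), rs, cs)
    let ans := if checkA r.2.1 r.2.2 k mainS r.1 then max ans ((k : Int) + 1) else ans
    kLoopA g m n i j r.2.1 r.2.2 mainS ans (k + 1)
  termination_by m - k
  decreasing_by omega

def largestMagicSquare (grid : List (List Int)) : Int :=
  let m := grid.length
  let n := grid.headI.length
  let st := (List.range m).foldl (fun st i =>
      (List.range n).foldl (fun (st : List Int × List Int × Int) j =>
        kLoopA grid m n i j (st.1.set 0 0) (st.2.1.set 0 0) 0 st.2.2 0)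
        st)
    (List.replicate m (0 : Int), List.replicate n (0 : Int), (0 : Int))
  st.2.2

-- ===== PORT B =====
-- acc = [0]; for x in row[:n]: acc.append(acc[-1] + x)   (the tail after the leading 0)
def pscanB (acc : Int) : List Int → List Int
  | [] => []
  | x :: t => (acc + x) :: pscanB (acc + x) t

-- P = [[0]*(n+1)]; for row in grid: P.append([p + a for p, a in zip(P[-1], acc)])
def ptableB (grid : List (List Int)) (n : Nat) : List (List Int) :=
  grid.foldl (fun P row =>
      P ++ [List.zipWith (· + ·) (P.getLastD []) (0 :: pscanB 0 (row.take n))])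
    [List.replicate (n + 1) (0 : Int)]

def rectB (P : List (List Int)) (r1 r2 c1 c2 : Nat) : Int :=
  g2 P r2 c2 - g2 P r1 c2 - g2 P r2 c1 + g2 P r1 c1

def largestMagicSquare_alt (grid : List (List Int)) : Int :=
  let m := grid.length
  let n := grid.headI.length
  let P := ptableB grid n
  (List.range m).foldl (fun ans i =>
    (List.range n).foldl (fun ans j =>
      (List.range (min (m - i) (n - j))).foldl (fun ans k =>
        let s := rectB P i (i + 1) j (j + k + 1)
        if ((List.range (k + 1)).all fun l => rectB P (i + l) (i + l + 1) j (j + k + 1) == s)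
            && ((List.range (k + 1)).all fun l => rectB P i (i + k + 1) (j + l) (j + l + 1) == s)
            && (((List.range (k + 1)).map fun t => g2 grid (i + t) (j + t)).sum == s)
            && (((List.range (k + 1)).map fun t => g2 grid (i + k - t) (j + t)).sum == s)
        then max ans ((k : Int) + 1) else ans) ans) ans) 0

-- ===== PRECONDITION & SPEC =====
-- Pre_ excludes exactly the inputs on which A raises an IndexError: the empty grid
-- (grid[0]) and grids having a row shorter than the first row (A reads grid[r][c] for
-- every c < len(grid[0]) in such a row).
def Pre_largestMagicSquare (grid : List (List Int)) : Prop :=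
  grid ≠ [] ∧ ∀ row ∈ grid, grid.headI.length ≤ row.length
instance (grid : List (List Int)) : Decidable (Pre_largestMagicSquare grid) := by
  unfold Pre_largestMagicSquare; infer_instance
def pvWitness_largestMagicSquare : List (List Int) := [[1, 2], [3, 4]]

def Spec_largestMagicSquare (grid : List (List Int)) (out : Int) : Prop := out = largestMagicSquare_alt grid
instance (grid : List (List Int)) (out : Int) : Decidable (Spec_largestMagicSquare grid out) := by unfold Spec_largestMagicSquare; infer_instance

-- ===== CLAIM (what is proved, stated in full; the proofs are below) =====
def Claim_equal_largestMagicSquare : Prop := ∀ (grid : List (List Int)), Dom_largestMagicSquare grid → Pre_largestMagicSquare grid → Spec_largestMagicSquare grid (largestMagicSquare grid)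

-- ===== LEMMAS AND PROOFS =====

-- sums of a row segment, a column segment and the two diagonals of a square block
def segRow (g : List (List Int)) (r c0 len : Nat) : Int :=
  ((List.range len).map fun t => g2 g r (c0 + t)).sum
def segCol (g : List (List Int)) (r0 c len : Nat) : Int :=
  ((List.range len).map fun t => g2 g (r0 + t) c).sum
def segDiag (g : List (List Int)) (i j len : Nat) : Int :=
  ((List.range len).map fun t => g2 g (i + t) (j + t)).sum
def segAdiag (g : List (List Int)) (i j k : Nat) : Int :=
  ((List.range (k + 1)).map fun t => g2 g (i + k - t) (j + t)).sum

-- the (k+1)-order square with top-left corner (i,j) is magic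
def magicAt (g : List (List Int)) (i j k : Nat) : Bool :=
  ((List.range (k + 1)).all fun l => segRow g (i + l) j (k + 1) == segRow g i j (k + 1))
    && ((List.range (k + 1)).all fun l => segCol g i (j + l) (k + 1) == segRow g i j (k + 1))
    && (segDiag g i j (k + 1) == segRow g i j (k + 1))
    && (segAdiag g i j k == segRow g i j (k + 1))

def stepM (g : List (List Int)) (i j : Nat) (ans : Int) (k : Nat) : Int :=
  if magicAt g i j k then max ans ((k : Int) + 1) else ans

-- common reference value both ports are proved equal to
def refFold (g : List (List Int)) (m n : Nat) : Int :=
  (List.range m).foldl (fun a i =>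
    (List.range n).foldl (fun a j =>
      (List.range (min (m - i) (n - j))).foldl (stepM g i j) a) a) 0

-- ---- B side: correctness of the prefix-sum table ----
-- pref g r c = sum of the top-left r x c rectangle (what P[r][c] holds)
def pref (g : List (List Int)) (r c : Nat) : Int :=
  ((g.take r).map fun row => (row.take c).sum).sum

lemma sum_take_succ (xs : List Int) (q : Nat) (h : q < xs.length) :
    (xs.take (q+1)).sum = (xs.take q).sum + xs.getD q 0 := by
  rw [List.take_succ_eq_append_getElem h, List.sum_append, List.getD_eq_getElem _ _ h]; simp

lemma pscanB_spec (xs : List Int) : ∀ a : Int,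
    pscanB a xs = (List.range xs.length).map (fun t => a + (xs.take (t+1)).sum) := by
  induction xs with
  | nil => intro a; simp [pscanB]
  | cons x t ih =>
    intro a
    simp only [pscanB, List.length_cons, List.range_succ_eq_map, List.map_cons, List.map_map]
    congr 1
    · simp
    · rw [ih (a + x)]
      apply List.map_eq_map_iff.mpr
      intro c _
      simp [List.take_succ_cons, add_assoc]

lemma cons0_pscanB (xs : List Int) :
    (0 : Int) :: pscanB 0 xs = (List.range (xs.length + 1)).map (fun c => (xs.take c).sum) := by
  rw [pscanB_spec, List.range_succ_eq_map, List.map_cons, List.map_map]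
  simp

lemma ptableB_spec (n : Nat) (g : List (List Int)) (h : ∀ row ∈ g, n ≤ row.length) :
    ptableB g n = (List.range (g.length + 1)).map
      (fun r => (List.range (n + 1)).map (fun c => pref g r c)) := by
  induction g using List.reverseRecOn with
  | nil => simp [ptableB, pref, List.map_const']
  | append_singleton g row ih =>
    have hg : ∀ r ∈ g, n ≤ r.length := fun r hr => h r (by simp [hr])
    have hrow : n ≤ row.length := h row (by simp)
    have hstep : ptableB (g ++ [row]) n = ptableB g n ++
        [List.zipWith (· + ·) ((ptableB g n).getLastD []) (0 :: pscanB 0 (row.take n))] := by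
      simp [ptableB, List.foldl_append]
    set F : Nat → List Int := fun r => (List.range (n + 1)).map (fun c => pref g r c) with hF
    set G : Nat → List Int :=
      fun r => (List.range (n + 1)).map (fun c => pref (g ++ [row]) r c) with hG
    have hlast : ((List.range (g.length + 1)).map F).getLastD [] = F g.length := by
      rw [List.range_succ, List.map_append, List.map_singleton, List.getLastD_concat]
    rw [hstep, ih hg, hlast, cons0_pscanB]
    have hlen : (row.take n).length = n := by simp [hrow]
    rw [hlen]
    have hzip : List.zipWith (· + ·) (F g.length)
        ((List.range (n + 1)).map fun c => ((row.take n).take c).sum) = G (g.length + 1) := by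
      rw [hF]
      simp only []
      rw [List.zipWith_map, List.zipWith_self, hG]
      apply List.map_eq_map_iff.mpr
      intro c hc
      simp only [List.mem_range] at hc
      rw [List.take_take, Nat.min_eq_left (by omega)]
      simp only [pref]
      rw [List.take_of_length_le (by simp : (g ++ [row]).length ≤ g.length + 1),
        List.map_append, List.sum_append, List.take_length]
      simp
    rw [hzip]
    have hL : (g ++ [row]).length + 1 = (g.length + 1) + 1 := by simp
    rw [hL, show List.range (g.length + 1 + 1) = List.range (g.length + 1) ++ [g.length + 1]
        from List.range_succ, List.map_append, List.map_singleton]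
    congr 1
    apply List.map_eq_map_iff.mpr
    intro r hr
    simp only [List.mem_range] at hr
    simp only [hF, hG]
    apply List.map_eq_map_iff.mpr
    intro c _
    simp only [pref]
    rw [List.take_append_of_le_length (by omega)]

lemma g2_ptableB (n : Nat) (g : List (List Int)) (h : ∀ row ∈ g, n ≤ row.length)
    (r c : Nat) (hr : r ≤ g.length) (hc : c ≤ n) :
    g2 (ptableB g n) r c = pref g r c := by
  rw [ptableB_spec n g h]
  simp only [g2]
  rw [show ((List.range (g.length + 1)).map
      (fun r => (List.range (n + 1)).map (fun c => pref g r c))).getD r []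
      = (List.range (n + 1)).map (fun c => pref g r c) from
    PySem.List.getD_map_range _ _ _ _ (by omega)]
  exact PySem.List.getD_map_range _ _ _ _ (by omega)

lemma sum_take_add (xs : List Int) (c0 : Nat) : ∀ len, c0 + len ≤ xs.length →
    (xs.take (c0 + len)).sum
      = (xs.take c0).sum + ((List.range len).map fun t => xs.getD (c0 + t) 0).sum := by
  intro len
  induction len with
  | zero => simp
  | succ q ih =>
    intro h
    rw [show c0 + (q + 1) = (c0 + q) + 1 from rfl, sum_take_succ xs (c0 + q) (by omega),
      ih (by omega), List.range_succ, List.map_append, List.sum_append]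
    simp [add_assoc]

lemma pref_succ (g : List (List Int)) (r c : Nat) (hr : r < g.length) :
    pref g (r + 1) c = pref g r c + ((g.getD r []).take c).sum := by
  simp only [pref]
  rw [List.take_succ_eq_append_getElem hr, List.map_append, List.sum_append,
    List.getD_eq_getElem _ _ hr]
  simp

lemma pref_row_add (g : List (List Int)) (i c : Nat) : ∀ q, i + q ≤ g.length →
    pref g (i + q) c
      = pref g i c + ((List.range q).map fun t => ((g.getD (i + t) []).take c).sum).sum := by
  intro q
  induction q with
  | zero => simp
  | succ q ih =>
    intro h
    rw [show i + (q + 1) = (i + q) + 1 from rfl, pref_succ g (i + q) c (by omega), ih (by omega),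
      List.range_succ, List.map_append, List.sum_append]
    simp [add_assoc]

lemma getD_mem_of_lt {α : Type} (l : List α) (d : α) (r : Nat) (h : r < l.length) :
    l.getD r d ∈ l := by
  rw [List.getD_eq_getElem _ _ h]
  exact List.getElem_mem h

lemma rect_row (n : Nat) (g : List (List Int)) (h : ∀ row ∈ g, n ≤ row.length)
    (r j k : Nat) (hr : r < g.length) (hjk : j + k + 1 ≤ n) :
    rectB (ptableB g n) r (r + 1) j (j + k + 1) = segRow g r j (k + 1) := by
  have hrow : n ≤ (g.getD r []).length := h _ (getD_mem_of_lt _ _ _ (by omega))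
  simp only [rectB]
  rw [g2_ptableB n g h (r+1) (j+k+1) (by omega) (by omega),
    g2_ptableB n g h r (j+k+1) (by omega) (by omega),
    g2_ptableB n g h (r+1) j (by omega) (by omega),
    g2_ptableB n g h r j (by omega) (by omega),
    pref_succ g r (j+k+1) hr, pref_succ g r j hr,
    show j + k + 1 = j + (k + 1) from rfl,
    sum_take_add (g.getD r []) j (k+1) (by omega)]
  simp only [segRow, g2]
  ring

lemma rect_col (n : Nat) (g : List (List Int)) (h : ∀ row ∈ g, n ≤ row.length)
    (i j k : Nat) (hik : i + k + 1 ≤ g.length) (hj : j + 1 ≤ n) :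
    rectB (ptableB g n) i (i + k + 1) j (j + 1) = segCol g i j (k + 1) := by
  simp only [rectB]
  rw [g2_ptableB n g h (i+k+1) (j+1) (by omega) (by omega),
    g2_ptableB n g h i (j+1) (by omega) (by omega),
    g2_ptableB n g h (i+k+1) j (by omega) (by omega),
    g2_ptableB n g h i j (by omega) (by omega),
    show i + k + 1 = i + (k + 1) from rfl,
    pref_row_add g i (j+1) (k+1) (by omega), pref_row_add g i j (k+1) (by omega)]
  have hterm : ((List.range (k+1)).map fun t => ((g.getD (i + t) []).take (j + 1)).sum)
      = (List.range (k+1)).map fun t => ((g.getD (i + t) []).take j).sum + g2 g (i + t) j := by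
    apply List.map_eq_map_iff.mpr
    intro t ht
    simp only [List.mem_range] at ht
    have hrow : n ≤ (g.getD (i + t) []).length := h _ (getD_mem_of_lt _ _ _ (by omega))
    rw [sum_take_succ _ j (by omega)]
    rfl
  rw [hterm]
  have hsplit : ((List.range (k+1)).map
        fun t => ((g.getD (i + t) []).take j).sum + g2 g (i + t) j).sum
      = ((List.range (k+1)).map fun t => ((g.getD (i + t) []).take j).sum).sum
        + ((List.range (k+1)).map fun t => g2 g (i + t) j).sum := by
    rw [← List.sum_map_add]
  rw [hsplit]
  simp only [segCol]
  ring

lemma all_congr_mem {α : Type} (l : List α) (p q : α → Bool) (h : ∀ x ∈ l, p x = q x) :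
    l.all p = l.all q := by
  induction l with
  | nil => rfl
  | cons x t ih =>
    simp only [List.all_cons, h x (by simp), ih fun y hy => h y (by simp [hy])]

theorem B_eq_ref (g : List (List Int))
    (hrow : ∀ row ∈ g, g.headI.length ≤ row.length) :
    largestMagicSquare_alt g = refFold g g.length g.headI.length := by
  simp only [largestMagicSquare_alt, refFold]
  set m := g.length
  set n := g.headI.length
  apply PySem.List.foldl_congr_mem
  intro a i hi
  simp only [List.mem_range] at hi
  apply PySem.List.foldl_congr_mem
  intro a j hj
  simp only [List.mem_range] at hj
  apply PySem.List.foldl_congr_mem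
  intro a k hk
  simp only [List.mem_range] at hk
  have hik : i + k < m := by omega
  have hjk : j + k < n := by omega
  have hs : rectB (ptableB g n) i (i + 1) j (j + k + 1) = segRow g i j (k + 1) :=
    rect_row n g hrow i j k (by omega) (by omega)
  simp only [hs]
  have hc1 : ((List.range (k + 1)).all fun l =>
      rectB (ptableB g n) (i + l) (i + l + 1) j (j + k + 1) == segRow g i j (k + 1))
      = ((List.range (k + 1)).all fun l => segRow g (i + l) j (k + 1) == segRow g i j (k + 1)) := by
    apply all_congr_mem
    intro l hl
    simp only [List.mem_range] at hl
    rw [rect_row n g hrow (i + l) j k (by omega) (by omega)]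
  have hc2 : ((List.range (k + 1)).all fun l =>
      rectB (ptableB g n) i (i + k + 1) (j + l) (j + l + 1) == segRow g i j (k + 1))
      = ((List.range (k + 1)).all fun l => segCol g i (j + l) (k + 1) == segRow g i j (k + 1)) := by
    apply all_congr_mem
    intro l hl
    simp only [List.mem_range] at hl
    rw [show j + l + 1 = (j + l) + 1 from rfl, rect_col n g hrow i (j + l) k (by omega) (by omega)]
  rw [hc1, hc2]
  rfl

-- ---- A side: loop invariants for the incremental sums ----
def stepL (g : List (List Int)) (i j k : Nat) (st : Int × List Int × List Int) (l : Nat) :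
    Int × List Int × List Int :=
  let su := st.1 + g2 g (i + k - l) (j + l)
  let rs := st.2.1.set l (st.2.1.getD l 0 + g2 g (i + l) (j + k))
  let cs := st.2.2.set l (st.2.2.getD l 0 + g2 g (i + k) (j + l))
  let rs := rs.set k (rs.getD k 0 + g2 g (i + k) (j + l))
  let cs := cs.set k (cs.getD k 0 + g2 g (i + l) (j + k))
  (su, rs, cs)

lemma lLoopA_eq (g : List (List Int)) (i j k : Nat) (st : Int × List Int × List Int) :
    lLoopA g i j k st = (List.range k).foldl (stepL g i j k) st := rfl

lemma getD_set_eq (xs : List Int) (q : Nat) (v d : Int) (h : q < xs.length) :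
    (xs.set q v).getD q d = v := by
  simp [List.getD, h]

lemma getD_set_ne (xs : List Int) (q p : Nat) (v d : Int) (h : p ≠ q) :
    (xs.set q v).getD p d = xs.getD p d := by
  simp only [List.getD, List.getElem?_set]
  rw [if_neg (Ne.symm h)]

lemma lLoopA_partial (g : List (List Int)) (i j k : Nat) (rs cs : List Int) (s0 : Int)
    (hr : k < rs.length) (hc : k < cs.length) : ∀ l', l' ≤ k →
    ((List.range l').foldl (stepL g i j k) (s0, rs, cs)).1
        = s0 + ((List.range l').map fun t => g2 g (i + k - t) (j + t)).sum
    ∧ ((List.range l').foldl (stepL g i j k) (s0, rs, cs)).2.1.length = rs.length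
    ∧ ((List.range l').foldl (stepL g i j k) (s0, rs, cs)).2.2.length = cs.length
    ∧ (∀ q, ((List.range l').foldl (stepL g i j k) (s0, rs, cs)).2.1.getD q 0
        = if q < l' then rs.getD q 0 + g2 g (i + q) (j + k)
          else if q = k then
            rs.getD k 0 + ((List.range l').map fun c => g2 g (i + k) (j + c)).sum
          else rs.getD q 0)
    ∧ (∀ q, ((List.range l').foldl (stepL g i j k) (s0, rs, cs)).2.2.getD q 0
        = if q < l' then cs.getD q 0 + g2 g (i + k) (j + q)
          else if q = k then
            cs.getD k 0 + ((List.range l').map fun c => g2 g (i + c) (j + k)).sum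
          else cs.getD q 0) := by
  intro l'
  induction l' with
  | zero =>
    intro _
    refine ⟨by simp, rfl, rfl, ?_, ?_⟩ <;>
    · intro q
      split_ifs with h1 h2 <;> simp_all
  | succ l ih =>
    intro hlk
    obtain ⟨ih1, ih2, ih3, ih4, ih5⟩ := ih (by omega)
    rw [List.range_succ, List.foldl_append, List.foldl_cons, List.foldl_nil]
    set R := (List.range l).foldl (stepL g i j k) (s0, rs, cs) with hR
    have hlen1 : R.2.1.length = rs.length := ih2
    have hlen2 : R.2.2.length = cs.length := ih3
    have hlk' : l < k := by omega
    simp only [stepL]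
    refine ⟨?_, ?_, ?_, ?_, ?_⟩
    · rw [ih1, List.map_append, List.sum_append]
      simp [add_assoc]
    · simp [hlen1]
    · simp [hlen2]
    · intro q
      by_cases hqk : q = k
      · rw [hqk, getD_set_eq _ _ _ _ (by simp [hlen1]; omega),
          getD_set_ne _ _ _ _ _ (by omega), ih4 k]
        rw [if_neg (by omega), if_pos rfl, if_neg (by omega), if_pos rfl,
          List.map_append, List.sum_append]
        simp [add_assoc]
      · rw [getD_set_ne _ _ _ _ _ hqk]
        by_cases hql : q = l
        · subst hql
          rw [getD_set_eq _ _ _ _ (by omega), ih4 q, if_neg (by omega), if_neg hqk,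
            if_pos (by omega)]
        · rw [getD_set_ne _ _ _ _ _ hql, ih4 q]
          split_ifs with h1 h2 h3 <;> first | rfl | omega
    · intro q
      by_cases hqk : q = k
      · rw [hqk, getD_set_eq _ _ _ _ (by simp [hlen2]; omega),
          getD_set_ne _ _ _ _ _ (by omega), ih5 k]
        rw [if_neg (by omega), if_pos rfl, if_neg (by omega), if_pos rfl,
          List.map_append, List.sum_append]
        simp [add_assoc]
      · rw [getD_set_ne _ _ _ _ _ hqk]
        by_cases hql : q = l
        · subst hql
          rw [getD_set_eq _ _ _ _ (by omega), ih5 q, if_neg (by omega), if_neg hqk,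
            if_pos (by omega)]
        · rw [getD_set_ne _ _ _ _ _ hql, ih5 q]
          split_ifs with h1 h2 h3 <;> first | rfl | omega

lemma take_eq_map_range (xs : List Int) (q : Nat) (h : q ≤ xs.length) :
    xs.take q = (List.range q).map (fun l => xs.getD l 0) := by
  apply List.ext_getElem
  · simp [h]
  · intro i h1 h2
    simp only [List.getElem_take, List.getElem_map, List.getElem_range]
    rw [List.getD_eq_getElem _ _ (by simp at h1; omega)]

lemma len_one_iff (st : List Int) (hnd : st.Nodup) (z : Int) (hz : z ∈ st) :
    st.length = 1 ↔ ∀ x ∈ st, x = z := by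
  match st with
  | [x] =>
    simp only [List.length_cons, List.length_nil, List.mem_singleton] at *
    subst hz
    simp
  | x :: y :: t =>
    simp only [List.length_cons] at *
    constructor
    · omega
    · intro hall
      rw [hall x (by simp), hall y (by simp)] at hnd
      simp at hnd

lemma checkA_eq_magic (g : List (List Int)) (i j k : Nat) (rs cs : List Int)
    (hr : k < rs.length) (hc : k < cs.length)
    (hrow : ∀ l, l ≤ k → rs.getD l 0 = segRow g (i + l) j (k + 1))
    (hcol : ∀ l, l ≤ k → cs.getD l 0 = segCol g i (j + l) (k + 1)) :
    checkA rs cs k (segDiag g i j (k + 1)) (segAdiag g i j k) = magicAt g i j k := by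
  have hTr : rs.take (k + 1) = (List.range (k + 1)).map (fun l => segRow g (i + l) j (k + 1)) := by
    rw [take_eq_map_range _ _ (by omega)]
    exact List.map_eq_map_iff.mpr fun l hl => hrow l (by simp at hl; omega)
  have hTc : cs.take (k + 1) = (List.range (k + 1)).map (fun l => segCol g i (j + l) (k + 1)) := by
    rw [take_eq_map_range _ _ (by omega)]
    exact List.map_eq_map_iff.mpr fun l hl => hcol l (by simp at hl; omega)
  simp only [checkA, hTr, hTc]
  set z := segRow g i j (k + 1) with hzdef
  set st : PySem.Set Int := PySem.Set.add (PySem.Set.add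
    (PySem.Set.union (PySem.Set.ofList ((List.range (k + 1)).map (fun l => segRow g (i + l) j (k + 1))))
      ((List.range (k + 1)).map (fun l => segCol g i (j + l) (k + 1))))
    (segDiag g i j (k + 1))) (segAdiag g i j k) with hst
  have hmem : ∀ x : Int, x ∈ st ↔
      ((∃ l, l < k + 1 ∧ x = segRow g (i + l) j (k + 1))
        ∨ (∃ l, l < k + 1 ∧ x = segCol g i (j + l) (k + 1)))
      ∨ x = segDiag g i j (k + 1) ∨ x = segAdiag g i j k := by
    intro x
    rw [hst]
    simp only [PySem.Set.mem_add, PySem.Set.mem_union, PySem.Set.mem_ofList, List.mem_map,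
      List.mem_range]
    constructor
    · rintro ((((⟨l, hl, hx⟩ | ⟨l, hl, hx⟩) | hx) | hx))
      · exact Or.inl (Or.inl ⟨l, hl, hx.symm⟩)
      · exact Or.inl (Or.inr ⟨l, hl, hx.symm⟩)
      · exact Or.inr (Or.inl hx)
      · exact Or.inr (Or.inr hx)
    · rintro ((⟨l, hl, hx⟩ | ⟨l, hl, hx⟩) | hx | hx)
      · exact Or.inl (Or.inl (Or.inl ⟨l, hl, hx.symm⟩))
      · exact Or.inl (Or.inl (Or.inr ⟨l, hl, hx.symm⟩))
      · exact Or.inl (Or.inr hx)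
      · exact Or.inr hx
  have hnd : st.Nodup := by
    rw [hst]
    apply PySem.Set.nodup_add
    apply PySem.Set.nodup_add
    exact PySem.Set.nodup_union _ _ (PySem.Set.nodup_ofList _)
  have hzmem : z ∈ st := by
    rw [hmem]
    exact Or.inl (Or.inl ⟨0, by omega, by simp [hzdef]⟩)
  apply Bool.coe_iff_coe.mp
  rw [show PySem.Set.len st = (st.length : Int) from rfl, beq_iff_eq, Nat.cast_eq_one,
    len_one_iff st hnd z hzmem]
  simp only [magicAt, Bool.and_eq_true, List.all_eq_true, List.mem_range, beq_iff_eq, ← hzdef]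
  constructor
  · intro hall
    refine ⟨⟨⟨?_, ?_⟩, ?_⟩, ?_⟩
    · intro l hl
      exact hall _ ((hmem _).mpr (Or.inl (Or.inl ⟨l, hl, rfl⟩)))
    · intro l hl
      exact hall _ ((hmem _).mpr (Or.inl (Or.inr ⟨l, hl, rfl⟩)))
    · exact hall _ ((hmem _).mpr (Or.inr (Or.inl rfl)))
    · exact hall _ ((hmem _).mpr (Or.inr (Or.inr rfl)))
  · rintro ⟨⟨⟨h1, h2⟩, h3⟩, h4⟩ x hx
    rcases (hmem x).mp hx with (⟨l, hl, rfl⟩ | ⟨l, hl, rfl⟩) | rfl | rfl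
    · exact h1 l hl
    · exact h2 l hl
    · exact h3
    · exact h4

lemma segRow_succ (g : List (List Int)) (r c0 k : Nat) :
    segRow g r c0 (k + 1) = segRow g r c0 k + g2 g r (c0 + k) := by
  simp [segRow, List.range_succ]

lemma segCol_succ (g : List (List Int)) (r0 c k : Nat) :
    segCol g r0 c (k + 1) = segCol g r0 c k + g2 g (r0 + k) c := by
  simp [segCol, List.range_succ]

lemma segDiag_succ (g : List (List Int)) (i j k : Nat) :
    segDiag g i j (k + 1) = segDiag g i j k + g2 g (i + k) (j + k) := by
  simp [segDiag, List.range_succ]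

lemma kLoop_spec (g : List (List Int)) (m n i j : Nat) : ∀ (fuel k : Nat)
    (rs cs : List Int) (mainS ans : Int), m - k = fuel →
    rs.length = m → cs.length = n → mainS = segDiag g i j k →
    (∀ l, l < k → rs.getD l 0 = segRow g (i + l) j k) →
    (∀ l, l < k → cs.getD l 0 = segCol g i (j + l) k) →
    (kLoopA g m n i j rs cs mainS ans k).2.2
        = (List.range' k (min (m - i) (n - j) - k)).foldl (stepM g i j) ans
    ∧ (kLoopA g m n i j rs cs mainS ans k).1.length = m
    ∧ (kLoopA g m n i j rs cs mainS ans k).2.1.length = n := by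
  intro fuel
  induction fuel with
  | zero =>
    intro k rs cs mainS ans hf h1 h2 _ _ _
    rw [kLoopA, dif_pos (by omega)]
    refine ⟨?_, h1, h2⟩
    rw [show min (m - i) (n - j) - k = 0 by omega, List.range'_zero]
    rfl
  | succ f ih =>
    intro k rs cs mainS ans hf h1 h2 hmain hrow hcol
    by_cases hguard : m ≤ k ∨ m ≤ i + k ∨ n ≤ j + k
    · rw [kLoopA, dif_pos hguard]
      refine ⟨?_, h1, h2⟩
      rw [show min (m - i) (n - j) - k = 0 by omega, List.range'_zero]
      rfl
    · rw [kLoopA, dif_neg hguard]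
      push Not at hguard
      obtain ⟨hkm, hikm, hjkn⟩ := hguard
      simp only []
      set rs0 := rs.set k (g2 g (i + k) (j + k)) with hrs0
      set cs0 := cs.set k (g2 g (i + k) (j + k)) with hcs0
      have hr0 : k < rs0.length := by simp [hrs0, h1]; omega
      have hc0 : k < cs0.length := by simp [hcs0, h2]; omega
      rw [lLoopA_eq]
      obtain ⟨p1, p2, p3, p4, p5⟩ :=
        lLoopA_partial g i j k rs0 cs0 (g2 g i (j + k)) hr0 hc0 k le_rfl
      set R := (List.range k).foldl (stepL g i j k) (g2 g i (j + k), rs0, cs0) with hRdef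
      have hlen1 : R.2.1.length = m := by rw [p2, hrs0]; simp [h1]
      have hlen2 : R.2.2.length = n := by rw [p3, hcs0]; simp [h2]
      have hrow' : ∀ l, l < k + 1 → R.2.1.getD l 0 = segRow g (i + l) j (k + 1) := by
        intro l hl
        rcases Nat.lt_or_ge l k with hlk | hlk
        · rw [p4 l, if_pos hlk, hrs0, getD_set_ne _ _ _ _ _ (by omega), hrow l hlk,
            segRow_succ]
        · have hlk' : l = k := by omega
          subst hlk'
          rw [p4 l, if_neg (by omega), if_pos rfl, hrs0, getD_set_eq _ _ _ _ (by omega),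
            segRow_succ]
          have : segRow g (i + l) j l = ((List.range l).map fun c => g2 g (i + l) (j + c)).sum := by
            simp [segRow]
          rw [← this]
          ring
      have hcol' : ∀ l, l < k + 1 → R.2.2.getD l 0 = segCol g i (j + l) (k + 1) := by
        intro l hl
        rcases Nat.lt_or_ge l k with hlk | hlk
        · rw [p5 l, if_pos hlk, hcs0, getD_set_ne _ _ _ _ _ (by omega), hcol l hlk,
            segCol_succ]
        · have hlk' : l = k := by omega
          subst hlk'
          rw [p5 l, if_neg (by omega), if_pos rfl, hcs0, getD_set_eq _ _ _ _ (by omega),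
            segCol_succ]
          have : segCol g i (j + l) l = ((List.range l).map fun c => g2 g (i + c) (j + l)).sum := by
            simp [segCol]
          rw [← this]
          ring
      have hmain' : mainS + g2 g (i + k) (j + k) = segDiag g i j (k + 1) := by
        rw [hmain, segDiag_succ]
      have hsub : R.1 = segAdiag g i j k := by
        rw [p1, segAdiag, List.range_succ, List.map_append, List.sum_append]
        simp
        ring
      have hcheck : checkA R.2.1 R.2.2 k (mainS + g2 g (i + k) (j + k)) R.1
          = magicAt g i j k := by
        rw [hmain', hsub]
        exact checkA_eq_magic g i j k R.2.1 R.2.2 (by omega) (by omega)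
          (fun l hl => hrow' l (by omega)) (fun l hl => hcol' l (by omega))
      obtain ⟨q1, q2, q3⟩ := ih (k + 1) R.2.1 R.2.2 (mainS + g2 g (i + k) (j + k))
        (if checkA R.2.1 R.2.2 k (mainS + g2 g (i + k) (j + k)) R.1 then max ans ((k : Int) + 1)
          else ans)
        (by omega) hlen1 hlen2 hmain' hrow' hcol'
      refine ⟨?_, q2, q3⟩
      rw [q1]
      rw [show min (m - i) (n - j) - k = (min (m - i) (n - j) - (k + 1)) + 1 by omega,
        List.range'_succ, List.foldl_cons]
      congr 1
      rw [hcheck]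
      rfl

lemma jfold_spec (g : List (List Int)) (m n i : Nat) : ∀ (js : List Nat)
    (st : List Int × List Int × Int), st.1.length = m → st.2.1.length = n →
    (js.foldl (fun (st : List Int × List Int × Int) j =>
        kLoopA g m n i j (st.1.set 0 0) (st.2.1.set 0 0) 0 st.2.2 0) st).2.2
      = js.foldl (fun a j => (List.range (min (m - i) (n - j))).foldl (stepM g i j) a) st.2.2
    ∧ (js.foldl (fun (st : List Int × List Int × Int) j =>
        kLoopA g m n i j (st.1.set 0 0) (st.2.1.set 0 0) 0 st.2.2 0) st).1.length = m
    ∧ (js.foldl (fun (st : List Int × List Int × Int) j =>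
        kLoopA g m n i j (st.1.set 0 0) (st.2.1.set 0 0) 0 st.2.2 0) st).2.1.length = n := by
  intro js
  induction js with
  | nil => intro st h1 h2; exact ⟨rfl, h1, h2⟩
  | cons j js ih =>
    intro st h1 h2
    simp only [List.foldl_cons]
    obtain ⟨k1, k2, k3⟩ := kLoop_spec g m n i j (m - 0) 0 (st.1.set 0 0) (st.2.1.set 0 0)
      0 st.2.2 rfl (by simp [h1]) (by simp [h2]) (by simp [segDiag]) (by omega) (by omega)
    obtain ⟨r1, r2, r3⟩ := ih _ k2 k3
    refine ⟨?_, r2, r3⟩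
    rw [r1, k1]
    rw [show min (m - i) (n - j) - 0 = min (m - i) (n - j) from rfl, ← List.range_eq_range']

lemma ifold_spec (g : List (List Int)) (m n : Nat) : ∀ (is : List Nat)
    (st : List Int × List Int × Int), st.1.length = m → st.2.1.length = n →
    (is.foldl (fun st i => (List.range n).foldl (fun (st : List Int × List Int × Int) j =>
        kLoopA g m n i j (st.1.set 0 0) (st.2.1.set 0 0) 0 st.2.2 0) st) st).2.2
      = is.foldl (fun a i =>
          (List.range n).foldl (fun a j =>
            (List.range (min (m - i) (n - j))).foldl (stepM g i j) a) a) st.2.2 := by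
  intro is
  induction is with
  | nil => intro st _ _; rfl
  | cons i is ih =>
    intro st h1 h2
    simp only [List.foldl_cons]
    obtain ⟨r1, r2, r3⟩ := jfold_spec g m n i (List.range n) st h1 h2
    rw [ih _ r2 r3, r1]

theorem A_eq_ref (g : List (List Int)) :
    largestMagicSquare g = refFold g g.length g.headI.length := by
  simp only [largestMagicSquare, refFold]
  exact ifold_spec g g.length g.headI.length (List.range g.length) _ (by simp) (by simp)

-- ===== VERDICT (by name: the statement is the Claim_ definition above) =====
theorem largestMagicSquare_spec : Claim_equal_largestMagicSquare := by
  intro g _ hpre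
  unfold Spec_largestMagicSquare
  rw [A_eq_ref, B_eq_ref g hpre.2]
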